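-- pv_equiv track=rewrite | github.com/SeanLee97/python_intermediate | recursive_to_iter/demo1.py | iter1
-- ===== SOURCE A (Python) =====
-- def iter1(n):
--     stack = []
--     while n > 0:
--         stack.append(n)
--         n //= 2
--     f = 1
--     while len(stack) > 0:
--         f = f*stack.pop()
--     return f
-- ===== SOURCE B (Python) =====
-- def iter1(n):
--     f = 1
--     while n > 0:
--         f *= n
--         n //= 2
--     return f
-- ===== Notes on version B (the rewrite author's own statement) =====
-- stated objective: simpler
-- what changed: Drops the stack and the second loop: the product is accumulated directly in one pass while halving n, relying on commutativity of multiplication.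
import Mathlib
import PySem

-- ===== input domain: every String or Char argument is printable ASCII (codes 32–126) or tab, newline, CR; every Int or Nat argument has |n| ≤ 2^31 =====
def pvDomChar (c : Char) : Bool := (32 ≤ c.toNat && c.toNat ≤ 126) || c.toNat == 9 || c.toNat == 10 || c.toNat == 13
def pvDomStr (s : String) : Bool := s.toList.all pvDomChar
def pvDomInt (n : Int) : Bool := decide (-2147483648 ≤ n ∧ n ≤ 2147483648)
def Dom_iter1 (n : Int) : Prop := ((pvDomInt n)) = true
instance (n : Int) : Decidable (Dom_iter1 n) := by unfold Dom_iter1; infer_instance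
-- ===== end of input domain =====

-- B replaces A's stack + second pop-loop with a single accumulating loop (simpler, O(1) space).

-- ===== PORT A =====
-- first while loop of A: push n, then n //= 2, while n > 0
def iter1Stack (n : Int) : List Int :=
  if _h : n > 0 then n :: iter1Stack (PySem.Int.floordiv n 2)
  else []
termination_by n.toNat
decreasing_by
  have := PySem.Int.floordiv_eq_ediv_of_pos (a := n) (b := 2) (by omega)
  rw [this]; omega

-- second while loop of A: f = f * stack.pop() until empty (pop takes the last element)
def iter1Pops (stack : List Int) (f : Int) : Int :=
  match hm : stack.getLast? with
  | some x => iter1Pops (stack.dropLast) (f * x)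
  | none => f
termination_by stack.length
decreasing_by
  cases stack with
  | nil => simp at hm
  | cons a l => simp [List.length_dropLast]

def iter1 (n : Int) : Int := iter1Pops (iter1Stack n) 1

-- ===== PORT B =====
def iter1_alt (n : Int) : Int :=
  if _h : n > 0 then
    -- f *= n; n //= 2  (tail loop written with an accumulator via the helper below)
    iter1AltLoop (PySem.Int.floordiv n 2) n
  else 1
where
  iter1AltLoop (n f : Int) : Int :=
    if _h : n > 0 then iter1AltLoop (PySem.Int.floordiv n 2) (f * n)
    else f
  termination_by n.toNat
  decreasing_by
    have := PySem.Int.floordiv_eq_ediv_of_pos (a := n) (b := 2) (by omega)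
    rw [this]; omega

-- ===== PRECONDITION & SPEC =====
def Spec_iter1 (n : Int) (out : Int) : Prop := out = iter1_alt n
instance (n : Int) (out : Int) : Decidable (Spec_iter1 n out) := by unfold Spec_iter1; infer_instance

-- ===== CLAIM (what is proved, stated in full; the proofs are below) =====
def Claim_equal_iter1 : Prop := ∀ (n : Int), Dom_iter1 n → Spec_iter1 n (iter1 n)

-- ===== LEMMAS AND PROOFS =====

theorem iter1Pops_eq (stack : List Int) (f : Int) : iter1Pops stack f = f * stack.prod := by
  induction stack, f using iter1Pops.induct with
  | case1 stack f x hx ih =>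
    rw [iter1Pops]
    split
    · rename_i y hy
      rw [hx] at hy
      injection hy with e
      subst e
      rw [ih]
      obtain ⟨l', rfl⟩ := List.getLast?_eq_some_iff.mp hx
      simp [List.prod_append]; ring
    · rename_i hy
      rw [hx] at hy
      cases hy
  | case2 stack f hx =>
    rw [iter1Pops]
    split
    · rename_i y hy
      rw [hx] at hy
      cases hy
    · simp [List.getLast?_eq_none_iff.mp hx]

theorem iter1Stack_pos {n : Int} (h : n > 0) :
    iter1Stack n = n :: iter1Stack (PySem.Int.floordiv n 2) := by
  rw [iter1Stack]; simp [h]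

theorem iter1Stack_nonpos {n : Int} (h : ¬ n > 0) : iter1Stack n = [] := by
  rw [iter1Stack]; simp [h]

theorem iter1AltLoop_eq (n f : Int) :
    iter1_alt.iter1AltLoop n f = f * (iter1Stack n).prod := by
  induction n using iter1Stack.induct generalizing f with
  | case1 n h ih =>
    rw [iter1_alt.iter1AltLoop, dif_pos h, ih, iter1Stack_pos h]
    simp; ring
  | case2 n h =>
    rw [iter1_alt.iter1AltLoop, dif_neg h, iter1Stack_nonpos h]
    simp

theorem iter1_eq_prod (n : Int) : iter1 n = (iter1Stack n).prod := by
  rw [iter1, iter1Pops_eq]; ring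

theorem iter1_alt_eq_prod (n : Int) : iter1_alt n = (iter1Stack n).prod := by
  rw [iter1_alt]
  split
  · rename_i h
    rw [iter1AltLoop_eq, iter1Stack_pos h]
    simp
  · rename_i h
    rw [iter1Stack_nonpos h]; simp

-- ===== VERDICT (by name: the statement is the Claim_ definition above) =====
theorem iter1_spec : Claim_equal_iter1 := by
  intro n _
  unfold Spec_iter1
  rw [iter1_eq_prod, iter1_alt_eq_prod]
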